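-- pv_equiv track=rewrite | github.com/Coriana/RamblingGPT | data/whispering/prepare.py | remove_caseifer
-- ===== SOURCE A (Python) =====
-- def remove_caseifer(text):
--     new_text = ""
--     i = 0
--     while i < len(text):
--         if text[i] == "^":
--             if i+1 < len(text):
--                 new_text += text[i+1].upper()
--                 i += 1
--             else:
--                 pass  # skip this index
--         else:
--             new_text += text[i]
--         i += 1
--     return new_text
-- ===== SOURCE B (Python) =====
-- def remove_caseifer(text):
--     out = []
--     upper_next = False
--     for c in text:
--         if upper_next:
--             out.append(c.upper())
--             upper_next = False
--         elif c == "^":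
--             upper_next = True
--         else:
--             out.append(c)
--     return "".join(out)
-- ===== Notes on version B (the rewrite author's own statement) =====
-- stated objective: faster
-- what changed: Replaced the index-with-lookahead while-loop building the result by repeated string concatenation with a single forward pass carrying an upper_next flag that collects characters into a list and joins once at the end.
import Mathlib
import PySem

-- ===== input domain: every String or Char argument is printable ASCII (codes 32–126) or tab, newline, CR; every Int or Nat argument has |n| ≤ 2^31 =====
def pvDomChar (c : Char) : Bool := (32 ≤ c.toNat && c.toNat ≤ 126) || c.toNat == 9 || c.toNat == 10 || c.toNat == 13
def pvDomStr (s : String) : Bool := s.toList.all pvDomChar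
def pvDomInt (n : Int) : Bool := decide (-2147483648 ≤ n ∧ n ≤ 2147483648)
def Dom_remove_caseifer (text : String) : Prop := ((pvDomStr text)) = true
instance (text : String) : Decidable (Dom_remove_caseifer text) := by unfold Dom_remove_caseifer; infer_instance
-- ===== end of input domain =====

-- B replaces A's manual-index while-loop with lookahead by a single flag-carrying pass (idiomatic decomposition; total, equivalence proved on all of Dom).

-- ===== PORT A =====
-- A's while-loop over index i: at '^' it looks ahead at text[i+1], appends its
-- uppercase and advances by 2, dropping a trailing lone '^'. Modelled as
-- recursion on the remaining character list; the two-element pattern mirrors the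
-- i+1 < len(text) lookahead test.
def remove_caseifer_loopA (acc : String) : List Char → String
  | [] => acc
  | [c] => if c = '^' then acc else acc.push c
  | c :: d :: rest =>
    if c = '^' then
      remove_caseifer_loopA (acc.push (PySem.Chars.upperChar d)) rest
    else
      remove_caseifer_loopA (acc.push c) (d :: rest)

def remove_caseifer (text : String) : String :=
  remove_caseifer_loopA "" text.toList

-- ===== PORT B =====
-- B: one pass with an upper_next flag.
def remove_caseifer_loopB (acc : String) (upperNext : Bool) : List Char → String
  | [] => acc
  | c :: rest =>
    if upperNext then
      remove_caseifer_loopB (acc.push (PySem.Chars.upperChar c)) false rest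
    else if c = '^' then
      remove_caseifer_loopB acc true rest
    else
      remove_caseifer_loopB (acc.push c) false rest

def remove_caseifer_alt (text : String) : String :=
  remove_caseifer_loopB "" false text.toList

-- ===== PRECONDITION & SPEC =====
def Spec_remove_caseifer (text : String) (out : String) : Prop := out = remove_caseifer_alt text
instance (text : String) (out : String) : Decidable (Spec_remove_caseifer text out) := by unfold Spec_remove_caseifer; infer_instance

-- ===== CLAIM (what is proved, stated in full; the proofs are below) =====
def Claim_equal_remove_caseifer : Prop := ∀ (text : String), Dom_remove_caseifer text → Spec_remove_caseifer text (remove_caseifer text)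

-- ===== LEMMAS AND PROOFS =====
-- A's two-step consumption at '^' corresponds to B's flag being set then consumed.
theorem remove_caseifer_loop_eq (n : Nat) :
    ∀ (cs : List Char), cs.length ≤ n → ∀ (acc : String),
      remove_caseifer_loopA acc cs = remove_caseifer_loopB acc false cs := by
  induction n with
  | zero =>
    intro cs h acc
    have : cs = [] := List.eq_nil_of_length_eq_zero (Nat.le_zero.mp h)
    subst this; rfl
  | succ n ih =>
    intro cs h acc
    match cs with
    | [] => rfl
    | [c] =>
      by_cases hc : c = '^' <;>
        simp [remove_caseifer_loopA, remove_caseifer_loopB, hc]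
    | c :: d :: rest =>
      have hlen₂ : rest.length ≤ n := by simp at h; omega
      have hlen₁ : (d :: rest).length ≤ n := by simp at h ⊢; omega
      by_cases hc : c = '^'
      · calc remove_caseifer_loopA acc (c :: d :: rest)
            = remove_caseifer_loopA (acc.push (PySem.Chars.upperChar d)) rest := by
              simp [remove_caseifer_loopA, hc]
          _ = remove_caseifer_loopB (acc.push (PySem.Chars.upperChar d)) false rest :=
              ih rest hlen₂ _
          _ = remove_caseifer_loopB acc false (c :: d :: rest) := by
              simp [remove_caseifer_loopB, hc]
      · calc remove_caseifer_loopA acc (c :: d :: rest)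
            = remove_caseifer_loopA (acc.push c) (d :: rest) := by
              simp [remove_caseifer_loopA, hc]
          _ = remove_caseifer_loopB (acc.push c) false (d :: rest) :=
              ih (d :: rest) hlen₁ _
          _ = remove_caseifer_loopB acc false (c :: d :: rest) := by
              simp [remove_caseifer_loopB, hc]

-- ===== VERDICT (by name: the statement is the Claim_ definition above) =====
theorem remove_caseifer_spec : Claim_equal_remove_caseifer := by
  intro text _
  unfold Spec_remove_caseifer remove_caseifer remove_caseifer_alt
  exact remove_caseifer_loop_eq text.toList.length text.toList (Nat.le_refl _) ""
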